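-- pv_equiv track=rewrite | github.com/jonathan-kofman/aria-os | aria_os/visual_qa/cli.py | _parse_kv_flags
-- ===== SOURCE A (Python) =====
-- def _parse_kv_flags(argv: list[str]) -> tuple[list[str], dict[str, str]]:
--     """Tiny argv splitter — no argparse to stay consistent with ARIA-OS."""
--     positional: list[str] = []
--     flags: dict[str, str] = {}
--     i = 0
--     while i < len(argv):
--         a = argv[i]
--         if a.startswith("--"):
--             key = a.lstrip("-")
--             if i + 1 < len(argv) and not argv[i + 1].startswith("--"):
--                 flags[key] = argv[i + 1]
--                 i += 2
--                 continue
--             flags[key] = "true"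
--             i += 1
--             continue
--         positional.append(a)
--         i += 1
--     return positional, flags
-- ===== SOURCE B (Python) =====
-- def _parse_kv_flags(argv: list[str]) -> tuple[list[str], dict[str, str]]:
--     """Single forward pass keeping a pending flag key instead of index lookahead."""
--     positional: list[str] = []
--     flags: dict[str, str] = {}
--     pending: str | None = None
--     for a in argv:
--         if a.startswith("--"):
--             if pending is not None:
--                 flags[pending] = "true"
--             pending = a.lstrip("-")
--         elif pending is not None:
--             flags[pending] = a
--             pending = None
--         else:
--             positional.append(a)
--     if pending is not None:
--         flags[pending] = "true"
--     return positional, flags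
-- ===== Notes on version B (the rewrite author's own statement) =====
-- stated objective: alternative
-- what changed: Replaces A's index-based while-loop with i+=2 lookahead by a single structural forward pass over argv that carries a pending flag key and flushes it ('true') on the next flag or at end of input.
import Mathlib
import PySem

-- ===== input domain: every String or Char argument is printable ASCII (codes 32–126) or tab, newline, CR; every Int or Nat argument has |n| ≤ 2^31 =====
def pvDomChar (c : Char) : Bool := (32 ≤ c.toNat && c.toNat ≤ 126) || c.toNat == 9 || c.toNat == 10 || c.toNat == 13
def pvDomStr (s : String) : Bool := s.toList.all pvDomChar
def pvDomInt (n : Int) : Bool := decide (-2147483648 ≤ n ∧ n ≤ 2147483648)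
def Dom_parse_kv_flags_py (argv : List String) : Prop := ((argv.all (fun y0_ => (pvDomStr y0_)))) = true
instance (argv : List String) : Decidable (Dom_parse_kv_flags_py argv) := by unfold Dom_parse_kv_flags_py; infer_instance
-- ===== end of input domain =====

-- B replaces A's index/lookahead while-loop by a pending-key single forward pass (alternative decomposition, same cost).


-- s.lstrip("-") for the single-char set {'-'}: drop leading '-' characters (hand-ported; exact for this call)
def pvLstripDash (s : String) : String := String.ofList (s.toList.dropWhile (· == '-'))

-- ===== PORT A =====
-- the while-loop of A: i-based scan with one-token lookahead (i += 2 when a value is consumed)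
def pvGoA (args : List String) (pos : List String) (flags : PySem.Dict String String) :
    List String × (List (String × String)) :=
  match args with
  | [] => (pos, flags.items)
  | a :: rest =>
    if PySem.Str.startswith a "--" then
      let key := pvLstripDash a
      match rest with
      | b :: rest2 =>
        if ¬ (PySem.Str.startswith b "--") then
          pvGoA rest2 pos (flags.insert key b)
        else
          pvGoA (b :: rest2) pos (flags.insert key "true")
      | [] => pvGoA [] pos (flags.insert key "true")
    else
      pvGoA rest (pos ++ [a]) flags

def parse_kv_flags_py (argv : List String) : List String × (List (String × String)) :=
  pvGoA argv [] PySem.Dict.empty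

-- ===== PORT B =====
-- B's loop: forward pass with a pending flag key; flush as "true" on a new flag and at the end
def pvGoB (args : List String) (pos : List String) (flags : PySem.Dict String String)
    (pending : Option String) : List String × (List (String × String)) :=
  match args with
  | [] =>
    match pending with
    | some k => (pos, (flags.insert k "true").items)
    | none => (pos, flags.items)
  | a :: rest =>
    if PySem.Str.startswith a "--" then
      let flags' := match pending with
        | some k => flags.insert k "true"
        | none => flags
      pvGoB rest pos flags' (some (pvLstripDash a))
    else
      match pending with
      | some k => pvGoB rest pos (flags.insert k a) none
      | none => pvGoB rest (pos ++ [a]) flags none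

def parse_kv_flags_py_alt (argv : List String) : List String × (List (String × String)) :=
  pvGoB argv [] PySem.Dict.empty none

-- ===== PRECONDITION & SPEC =====
def Spec_parse_kv_flags_py (argv : List String) (out : List String × (List (String × String))) : Prop := out = parse_kv_flags_py_alt argv
instance (argv : List String) (out : List String × (List (String × String))) : Decidable (Spec_parse_kv_flags_py argv out) := by unfold Spec_parse_kv_flags_py; infer_instance

-- ===== CLAIM (what is proved, stated in full; the proofs are below) =====
def Claim_equal_parse_kv_flags_py : Prop := ∀ (argv : List String), Dom_parse_kv_flags_py argv → Spec_parse_kv_flags_py argv (parse_kv_flags_py argv)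

-- ===== LEMMAS AND PROOFS =====

-- one-step unfolding lemmas for the two loops (guard split by startswith)
lemma pvGoA_cons_nonflag (a : String) (rest pos : List String) (flags : PySem.Dict String String)
    (ha : PySem.Str.startswith a "--" = false) :
    pvGoA (a :: rest) pos flags = pvGoA rest (pos ++ [a]) flags := by
  rw [pvGoA.eq_def]; have ha2 := ha; simp at ha2; simp [ha2]

lemma pvGoA_flag_nil (a : String) (pos : List String) (flags : PySem.Dict String String)
    (ha : PySem.Str.startswith a "--" = true) :
    pvGoA [a] pos flags = (pos, (flags.insert (pvLstripDash a) "true").items) := by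
  rw [pvGoA.eq_def]; have ha2 := ha; simp at ha2; simp [ha2, pvGoA]

lemma pvGoA_flag_val (a b : String) (rest2 pos : List String) (flags : PySem.Dict String String)
    (ha : PySem.Str.startswith a "--" = true) (hb : PySem.Str.startswith b "--" = false) :
    pvGoA (a :: b :: rest2) pos flags = pvGoA rest2 pos (flags.insert (pvLstripDash a) b) := by
  rw [pvGoA.eq_def]; have ha2 := ha; have hb2 := hb; simp at ha2 hb2; simp [ha2, hb2]

lemma pvGoA_flag_flag (a b : String) (rest2 pos : List String) (flags : PySem.Dict String String)
    (ha : PySem.Str.startswith a "--" = true) (hb : PySem.Str.startswith b "--" = true) :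
    pvGoA (a :: b :: rest2) pos flags = pvGoA (b :: rest2) pos (flags.insert (pvLstripDash a) "true") := by
  rw [pvGoA.eq_def]; have ha2 := ha; have hb2 := hb; simp at ha2 hb2; simp [ha2, hb2]

lemma pvGoB_cons_flag (a : String) (rest pos : List String) (flags : PySem.Dict String String)
    (pending : Option String) (ha : PySem.Str.startswith a "--" = true) :
    pvGoB (a :: rest) pos flags pending =
      pvGoB rest pos (match pending with | some k => flags.insert k "true" | none => flags)
        (some (pvLstripDash a)) := by
  rw [pvGoB.eq_def]; have ha2 := ha; simp at ha2; simp [ha2]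

lemma pvGoB_cons_nonflag_none (a : String) (rest pos : List String) (flags : PySem.Dict String String)
    (ha : PySem.Str.startswith a "--" = false) :
    pvGoB (a :: rest) pos flags none = pvGoB rest (pos ++ [a]) flags none := by
  rw [pvGoB.eq_def]; have ha2 := ha; simp at ha2; simp [ha2]

lemma pvGoB_cons_nonflag_some (a k : String) (rest pos : List String) (flags : PySem.Dict String String)
    (ha : PySem.Str.startswith a "--" = false) :
    pvGoB (a :: rest) pos flags (some k) = pvGoB rest pos (flags.insert k a) none := by
  rw [pvGoB.eq_def]; have ha2 := ha; simp at ha2; simp [ha2]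

-- Flushing a pending key before a flag token (or at the end) equals having inserted it already.
lemma pvGoB_pending_flush (args : List String) (pos : List String)
    (flags : PySem.Dict String String) (k : String)
    (h : args = [] ∨ ∃ a rest, args = a :: rest ∧ PySem.Str.startswith a "--" = true) :
    pvGoB args pos flags (some k) = pvGoB args pos (flags.insert k "true") none := by
  rcases h with rfl | ⟨a, rest, rfl, ha⟩
  · rfl
  · rw [pvGoB_cons_flag a rest pos flags (some k) ha,
        pvGoB_cons_flag a rest pos (flags.insert k "true") none ha]

-- The pending-key pass computes exactly A's lookahead loop.
lemma pvGoB_eq_pvGoA : ∀ (n : Nat) (args : List String), args.length ≤ n →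
    ∀ (pos : List String) (flags : PySem.Dict String String),
      pvGoB args pos flags none = pvGoA args pos flags := by
  intro n
  induction n with
  | zero =>
    intro args h pos flags
    have : args = [] := List.length_eq_zero_iff.mp (Nat.le_zero.mp h)
    subst this; rfl
  | succ n ih =>
    intro args h pos flags
    match args with
    | [] => rfl
    | a :: rest =>
      by_cases ha : PySem.Str.startswith a "--" = true
      · rw [pvGoB_cons_flag a rest pos flags none ha]
        match rest with
        | [] => rw [pvGoA_flag_nil a pos flags ha]; rfl
        | b :: rest2 =>
          by_cases hb : PySem.Str.startswith b "--" = true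
          · rw [pvGoB_pending_flush (b :: rest2) pos flags (pvLstripDash a)
                  (Or.inr ⟨b, rest2, rfl, hb⟩),
                ih (b :: rest2) (by simpa using Nat.le_of_succ_le_succ h),
                pvGoA_flag_flag a b rest2 pos flags ha hb]
          · rw [pvGoB_cons_nonflag_some b (pvLstripDash a) rest2 pos flags
                  (Bool.eq_false_iff.mpr hb),
                ih rest2 (by simp at h; omega),
                pvGoA_flag_val a b rest2 pos flags ha (Bool.eq_false_iff.mpr hb)]
      · rw [pvGoB_cons_nonflag_none a rest pos flags (Bool.eq_false_iff.mpr ha),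
            ih rest (by simp at h; omega),
            pvGoA_cons_nonflag a rest pos flags (Bool.eq_false_iff.mpr ha)]

-- ===== VERDICT (by name: the statement is the Claim_ definition above) =====
theorem parse_kv_flags_py_spec : Claim_equal_parse_kv_flags_py := by
  intro argv _
  unfold Spec_parse_kv_flags_py parse_kv_flags_py parse_kv_flags_py_alt
  exact (pvGoB_eq_pvGoA argv.length argv le_rfl [] PySem.Dict.empty).symm
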